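-- pv_equiv track=rewrite | github.com/PELAB-LiU/jupyter_nbs_empirical | exception_to_library_linker/notebook_exception.py | __identify_stacktrace_segments
-- ===== SOURCE A (Python) =====
-- from typing import List, Dict, Tuple, Iterator, Callable
--
-- _EXCEPTION_STACKTRACE_SPLIT = (
--     "During handling of the above exception, another exception occurred:"
-- )
--
-- _EXCEPTION_STACKTRACE_CAUSE = (
--     "The above exception was the direct cause of the following exception:"
-- )
--
-- def __identify_stacktrace_segments(
--     stacktrace: List[str],
-- ) -> Iterator[Tuple[int, int]]:
--     """
--     Identifies the line ranges in which a single exception is logged.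
--     Inner exceptions (i.e., those separated with sentences like:
--     'During handling of the above exception, another exception occurred:'.)
--     """
--     stacktrace_start = 0
--     for current, line in enumerate(stacktrace):
--         if (
--             not _EXCEPTION_STACKTRACE_SPLIT in line
--             and not _EXCEPTION_STACKTRACE_CAUSE in line
--         ):
--             continue
--         segment_start = (
--             stacktrace_start if stacktrace_start == 0 else stacktrace_start + 1
--         )
--         entry = (segment_start, current)
--         stacktrace_start = current
--         yield entry
--
--     stacktrace_end = len(stacktrace)
--     if stacktrace_end == stacktrace_start:
--         return
--
--     if stacktrace_start == 0:
--         yield (stacktrace_start, stacktrace_end)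
--     else:
--         yield (stacktrace_start + 1, stacktrace_end)
-- ===== SOURCE B (Python) =====
-- from typing import List, Iterator, Tuple
--
-- _EXCEPTION_STACKTRACE_SPLIT = (
--     "During handling of the above exception, another exception occurred:"
-- )
--
-- _EXCEPTION_STACKTRACE_CAUSE = (
--     "The above exception was the direct cause of the following exception:"
-- )
--
-- def __identify_stacktrace_segments(
--     stacktrace: List[str],
-- ) -> Iterator[Tuple[int, int]]:
--     """Recursive divide: emit the part before the FIRST sentinel, recurse on the suffix after it."""
--
--     def first_boundary(lines):
--         return next(
--             (
--                 i
--                 for i, line in enumerate(lines)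
--                 if _EXCEPTION_STACKTRACE_SPLIT in line
--                 or _EXCEPTION_STACKTRACE_CAUSE in line
--             ),
--             None,
--         )
--
--     def segments(lines, offset):
--         i = first_boundary(lines)
--         if i is None:
--             yield (offset, offset + len(lines))
--         else:
--             yield (offset, offset + i)
--             yield from segments(lines[i + 1:], offset + i + 1)
--
--     if stacktrace:
--         yield from segments(stacktrace, 0)
-- ===== Notes on version B (the rewrite author's own statement) =====
-- stated objective: alternative
-- what changed: Replaced A's single stateful scan (enumerate with conditional start-bookkeeping and a post-loop tail case) by a recursive divide: find the FIRST sentinel index, emit the segment before it, and recurse on the suffix after it; the no-sentinel case is the sole base case.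
-- intended difference: On nonempty inputs whose first line contains a sentinel, A returns overlapping segments because its start stays 0 after the first boundary (e.g. A([S]) = [(0,0),(0,1)]), while B starts the next segment after the sentinel (B([S]) = [(0,0),(1,1)]), the intended non-overlapping segmentation. — e.g. on __identify_stacktrace_segments(["During handling of the above exception, another exception occurred:"]): A returns [(0, 0), (0, 1)], B returns [(0, 0), (1, 1)]
import Mathlib
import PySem

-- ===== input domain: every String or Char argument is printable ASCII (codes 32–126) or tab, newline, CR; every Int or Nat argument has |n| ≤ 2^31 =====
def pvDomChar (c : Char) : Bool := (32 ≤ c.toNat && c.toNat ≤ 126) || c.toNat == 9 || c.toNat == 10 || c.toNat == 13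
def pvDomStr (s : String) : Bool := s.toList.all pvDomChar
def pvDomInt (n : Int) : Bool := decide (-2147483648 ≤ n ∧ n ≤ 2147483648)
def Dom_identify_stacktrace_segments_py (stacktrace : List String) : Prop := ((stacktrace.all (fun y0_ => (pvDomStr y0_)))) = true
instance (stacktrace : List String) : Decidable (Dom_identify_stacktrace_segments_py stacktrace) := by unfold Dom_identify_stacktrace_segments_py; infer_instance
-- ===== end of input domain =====

-- B replaces A's single stateful scan (conditional start-bookkeeping plus a post-loop tail case) by a
-- recursive divide: emit the segment before the FIRST sentinel and recurse on the suffix after it;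
-- B returns non-overlapping segments when the FIRST line is a sentinel, where A restarts the next
-- segment at 0 (stated as D_ below).

def pvSplitS : String := "During handling of the above exception, another exception occurred:"
def pvCauseS : String := "The above exception was the direct cause of the following exception:"

-- ===== PORT A =====
def pvStepA (st : Int × List (Int × Int)) (p : Int × String) : Int × List (Int × Int) :=
  if !PySem.Str.isIn pvSplitS p.2 && !PySem.Str.isIn pvCauseS p.2 then st
  else (p.1, st.2 ++ [((if st.1 = 0 then st.1 else st.1 + 1), p.1)])

def identify_stacktrace_segments_py (stacktrace : List String) : List (Int × Int) :=
  let r := (PySem.List.enumerate stacktrace).foldl pvStepA (0, [])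
  let n : Int := (stacktrace.length : Int)
  if n = r.1 then r.2
  else if r.1 = 0 then r.2 ++ [(r.1, n)] else r.2 ++ [(r.1 + 1, n)]

-- ===== PORT B =====
def pvIsBoundary (line : String) : Bool :=
  PySem.Str.isIn pvSplitS line || PySem.Str.isIn pvCauseS line

-- Source B's `segments(lines, offset)`: `first_boundary` is `List.findIdx?`, `lines[i+1:]` is
-- `List.drop (i+1)`. The fuel (initially lines.length) only makes the recursion on the shrinking
-- suffix structural; it is never exhausted and never alters the computed value.
def pvSeg (fuel : Nat) (lines : List String) (off : Int) : List (Int × Int) :=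
  match lines.findIdx? pvIsBoundary with
  | none => [(off, off + (lines.length : Int))]
  | some i =>
    match fuel with
    | 0 => []
    | fuel' + 1 => (off, off + (i : Int)) :: pvSeg fuel' (lines.drop (i + 1)) (off + (i : Int) + 1)

def identify_stacktrace_segments_py_alt (stacktrace : List String) : List (Int × Int) :=
  match stacktrace with
  | [] => []
  | _ :: _ => pvSeg stacktrace.length stacktrace 0

-- ===== PRECONDITION & SPEC =====
-- On nonempty inputs whose FIRST line contains a sentinel, A returns overlapping segments (the segment
-- after the first sentinel starts again at line 0, e.g. A [S] = [(0,0),(0,1)]), while B starts it after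
-- the sentinel (B [S] = [(0,0),(1,1)]), which is the intended non-overlapping segmentation.
def D_identify_stacktrace_segments_py (stacktrace : List String) : Prop :=
  stacktrace ≠ [] ∧
    (PySem.Str.isIn pvSplitS stacktrace.headI || PySem.Str.isIn pvCauseS stacktrace.headI) = true
instance (stacktrace : List String) : Decidable (D_identify_stacktrace_segments_py stacktrace) := by
  unfold D_identify_stacktrace_segments_py; infer_instance

def Spec_identify_stacktrace_segments_py (stacktrace : List String) (out : List (Int × Int)) : Prop :=
  ¬ D_identify_stacktrace_segments_py stacktrace → out = identify_stacktrace_segments_py_alt stacktrace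
instance (stacktrace : List String) (out : List (Int × Int)) : Decidable (Spec_identify_stacktrace_segments_py stacktrace out) := by
  unfold Spec_identify_stacktrace_segments_py; infer_instance

def pvDiffWitness_identify_stacktrace_segments_py : List String :=
  ["During handling of the above exception, another exception occurred:"]
def pvDiffWitnessOut_identify_stacktrace_segments_py : (List (Int × Int)) × (List (Int × Int)) :=
  ([(0, 0), (0, 1)], [(0, 0), (1, 1)])

-- ===== CLAIM (what is proved, stated in full; the proofs are below) =====
def Claim_unchanged_identify_stacktrace_segments_py : Prop := ∀ (stacktrace : List String), Dom_identify_stacktrace_segments_py stacktrace → Spec_identify_stacktrace_segments_py stacktrace (identify_stacktrace_segments_py stacktrace)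
def Claim_changed_identify_stacktrace_segments_py : Prop := Dom_identify_stacktrace_segments_py (pvDiffWitness_identify_stacktrace_segments_py) ∧ D_identify_stacktrace_segments_py (pvDiffWitness_identify_stacktrace_segments_py) ∧ identify_stacktrace_segments_py (pvDiffWitness_identify_stacktrace_segments_py) = pvDiffWitnessOut_identify_stacktrace_segments_py.1 ∧ identify_stacktrace_segments_py_alt (pvDiffWitness_identify_stacktrace_segments_py) = pvDiffWitnessOut_identify_stacktrace_segments_py.2 ∧ pvDiffWitnessOut_identify_stacktrace_segments_py.1 ≠ pvDiffWitnessOut_identify_stacktrace_segments_py.2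
def Claim_exact_identify_stacktrace_segments_py : Prop := ∀ (stacktrace : List String), Dom_identify_stacktrace_segments_py stacktrace → D_identify_stacktrace_segments_py stacktrace → identify_stacktrace_segments_py stacktrace ≠ identify_stacktrace_segments_py_alt stacktrace

-- ===== LEMMAS AND PROOFS =====

-- proof-side helper: the boundary-index fold both programs' results are related to
def pvStepB (st : Int × List (Int × Int)) (b : Int) : Int × List (Int × Int) :=
  (b + 1, st.2 ++ [(st.1, b)])

theorem pvStepA_pos (st : Int × List (Int × Int)) (i : Int) (y : String)
    (h : pvIsBoundary y = true) :
    pvStepA st (i, y) = (i, st.2 ++ [((if st.1 = 0 then st.1 else st.1 + 1), i)]) := by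
  unfold pvIsBoundary at h
  unfold pvStepA
  rcases Bool.or_eq_true_iff.mp h with h | h <;> rw [h] <;>
    simp only [Bool.not_true, Bool.false_and, Bool.and_false, Bool.false_eq_true, if_false]

theorem pvStepA_neg (st : Int × List (Int × Int)) (i : Int) (y : String)
    (h : pvIsBoundary y = false) : pvStepA st (i, y) = st := by
  unfold pvIsBoundary at h
  obtain ⟨h1, h2⟩ := Bool.or_eq_false_iff.mp h
  unfold pvStepA
  rw [h1, h2]
  simp only [Bool.not_false, Bool.and_self, if_true]

-- the shared loop invariant: A's fold from start s (with s+1 ≤ k, so the "start = 0 reset" case is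
-- ruled out for later boundaries) finished as A does equals the boundary fold
theorem pv_main : ∀ (ys : List String) (k s : Int) (acc : List (Int × Int)),
    1 ≤ k → s + 1 ≤ k →
    (let r := (PySem.List.enumerate ys k).foldl pvStepA (s, acc)
     let n : Int := k + ys.length
     if n = r.1 then r.2
     else if r.1 = 0 then r.2 ++ [(r.1, n)] else r.2 ++ [(r.1 + 1, n)])
    =
    (let r := (((PySem.List.enumerate ys k).filter (fun p => pvIsBoundary p.2)).map (·.1)).foldl
        pvStepB ((if s = 0 then (0 : Int) else s + 1), acc)
     r.2 ++ [(r.1, k + ys.length)]) := by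
  intro ys
  induction ys with
  | nil =>
    intro k s acc hk hs
    simp only [PySem.List.enumerate_nil, List.foldl_nil, List.filter_nil, List.map_nil,
      List.length_nil, Int.natCast_zero, add_zero]
    have hne : ¬ (k = s) := by omega
    split_ifs <;> simp_all
  | cons y ys ih =>
    intro k s acc hk hs
    have hn : k + (((y :: ys).length : Nat) : Int) = (k + 1) + ((ys.length : Nat) : Int) := by
      push_cast [List.length_cons]; ring
    simp only [PySem.List.enumerate_cons, List.foldl_cons, List.filter_cons]
    by_cases hb : pvIsBoundary y = true
    · have hifs : (if s = 0 then s else s + 1) = (if s = 0 then (0 : Int) else s + 1) := by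
        split_ifs with h
        · rw [h]
        · rfl
      rw [pvStepA_pos (s, acc) k y hb, hifs, if_pos hb]
      simp only [List.map_cons, List.foldl_cons, pvStepB]
      have hk0 : ¬ (k = 0) := by omega
      have := ih (k + 1) k (acc ++ [((if s = 0 then (0 : Int) else s + 1), k)])
        (by omega) (by omega)
      rw [if_neg hk0] at this
      simp only at this ⊢
      rw [hn, this]
    · rw [pvStepA_neg (s, acc) k y (Bool.not_eq_true _ ▸ hb), if_neg hb]
      have := ih (k + 1) s acc (by omega) (by omega)
      simp only at this ⊢
      rw [hn, this]

-- the accumulator is only appended to, by both folds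
theorem pv_stepA_acc (s : Int) (acc : List (Int × Int)) (l : Int × String) :
    pvStepA (s, acc) l = ((pvStepA (s, []) l).1, acc ++ (pvStepA (s, []) l).2) := by
  unfold pvStepA
  split_ifs <;> simp

theorem pv_prefixA : ∀ (ls : List (Int × String)) (s : Int) (acc : List (Int × Int)),
    ls.foldl pvStepA (s, acc)
      = ((ls.foldl pvStepA (s, [])).1, acc ++ (ls.foldl pvStepA (s, [])).2) := by
  intro ls
  induction ls with
  | nil => intro s acc; simp
  | cons l ls ih =>
    intro s acc
    rw [List.foldl_cons, List.foldl_cons, pv_stepA_acc s acc l, pv_stepA_acc s [] l,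
      List.nil_append, ih ((pvStepA (s, []) l).1) (acc ++ (pvStepA (s, []) l).2),
      ih ((pvStepA (s, []) l).1) ((pvStepA (s, []) l).2)]
    simp

theorem pv_prefixB : ∀ (bs : List Int) (s : Int) (acc : List (Int × Int)),
    bs.foldl pvStepB (s, acc)
      = ((bs.foldl pvStepB (s, [])).1, acc ++ (bs.foldl pvStepB (s, [])).2) := by
  intro bs
  induction bs with
  | nil => intro s acc; simp
  | cons b bs ih =>
    intro s acc
    simp only [List.foldl_cons, pvStepB, List.nil_append]
    rw [ih (b + 1) (acc ++ [(s, b)]), ih (b + 1) ([(s, b)])]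
    simp

-- characterisation of the filtered enumeration by the first boundary index
theorem pv_enum_filter : ∀ (lines : List String) (k : Int),
    ((PySem.List.enumerate lines k).filter (fun p => pvIsBoundary p.2)).map (·.1)
    = (match lines.findIdx? pvIsBoundary with
      | none => []
      | some i => (k + (i : Int)) ::
          ((PySem.List.enumerate (lines.drop (i + 1)) (k + (i : Int) + 1)).filter
            (fun p => pvIsBoundary p.2)).map (·.1)) := by
  intro lines
  induction lines with
  | nil => intro k; simp [PySem.List.enumerate_nil]
  | cons y ys ih =>
    intro k
    simp only [PySem.List.enumerate_cons, List.filter_cons, List.findIdx?_cons]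
    by_cases hb : pvIsBoundary y = true
    · simp [hb]
    · rw [if_neg hb]
      simp only [Bool.not_eq_true] at hb
      rw [hb]
      simp only [Bool.false_eq_true, if_false]
      rw [ih (k + 1)]
      cases h : ys.findIdx? pvIsBoundary with
      | none => simp
      | some i =>
        simp only [Option.map_some, List.drop_succ_cons]
        have h1 : k + 1 + (i : Int) = k + ((i + 1 : Nat) : Int) := by push_cast; ring
        rw [h1]

-- B's recursion equals the boundary fold (fuel is sufficient)
theorem pvSeg_eq_fold : ∀ (fuel : Nat) (lines : List String) (off : Int),
    lines.length ≤ fuel →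
    pvSeg fuel lines off
    = (let r := (((PySem.List.enumerate lines off).filter (fun p => pvIsBoundary p.2)).map
          (·.1)).foldl pvStepB (off, ([] : List (Int × Int)))
       r.2 ++ [(r.1, off + (lines.length : Int))]) := by
  intro fuel
  induction fuel with
  | zero =>
    intro lines off hf
    have : lines = [] := List.eq_nil_of_length_eq_zero (Nat.le_zero.mp hf)
    subst this
    simp [pvSeg, PySem.List.enumerate_nil]
  | succ fuel ih =>
    intro lines off hf
    rw [pvSeg, pv_enum_filter lines off]
    cases h : lines.findIdx? pvIsBoundary with
    | none => simp
    | some i =>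
      have hi : i < lines.length := List.findIdx?_eq_some_iff_findIdx_eq.mp h |>.1
      simp only [List.foldl_cons, pvStepB, List.nil_append]
      rw [pv_prefixB _ (off + (i : Int) + 1) [(off, off + (i : Int))]]
      have hlen : (lines.drop (i + 1)).length ≤ fuel := by
        rw [List.length_drop]; omega
      rw [ih (lines.drop (i + 1)) (off + (i : Int) + 1) hlen]
      simp only [List.length_drop]
      have : off + (i : Int) + 1 + ((lines.length - (i + 1) : Nat) : Int)
          = off + (lines.length : Int) := by
        have : (i + 1 : Nat) ≤ lines.length := hi
        push_cast [Nat.cast_sub this]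
        ring
      rw [this]
      simp

-- inside D_, A's second output pair starts at 0 …
theorem pv_A_zero : ∀ (ys : List String) (k : Int) (acc : List (Int × Int)), 1 ≤ k →
    ∃ (x : Int) (rest : List (Int × Int)),
    (let r := (PySem.List.enumerate ys k).foldl pvStepA (0, acc)
     let n : Int := k + ys.length
     if n = r.1 then r.2
     else if r.1 = 0 then r.2 ++ [(r.1, n)] else r.2 ++ [(r.1 + 1, n)])
    = acc ++ ((0 : Int), x) :: rest := by
  intro ys
  induction ys with
  | nil =>
    intro k acc hk
    refine ⟨k, [], ?_⟩
    have hk0 : ¬ (k = 0) := by omega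
    simp [PySem.List.enumerate_nil, hk0]
  | cons y ys ih =>
    intro k acc hk
    simp only [PySem.List.enumerate_cons, List.foldl_cons]
    by_cases hb : pvIsBoundary y = true
    · have hA : pvStepA (0, acc) (k, y) = (k, acc ++ [((0 : Int), k)]) := by
        rw [pvStepA_pos (0, acc) k y hb]; simp
      rw [hA]
      rw [pv_prefixA (PySem.List.enumerate ys (k + 1)) k (acc ++ [((0 : Int), k)])]
      set r := (PySem.List.enumerate ys (k + 1)).foldl pvStepA (k, []) with hr
      split_ifs with c1 c2
      · exact ⟨k, r.2, by simp⟩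
      · exact ⟨k, r.2 ++ [(r.1, k + ((y :: ys).length : Int))], by simp⟩
      · exact ⟨k, r.2 ++ [(r.1 + 1, k + ((y :: ys).length : Int))], by simp⟩
    · rw [pvStepA_neg (0, acc) k y (Bool.not_eq_true _ ▸ hb)]
      obtain ⟨x, rest, hx⟩ := ih (k + 1) acc (by omega)
      refine ⟨x, rest, ?_⟩
      simp only at hx ⊢
      have hn : k + ((y :: ys).length : Int) = (k + 1) + (ys.length : Int) := by
        push_cast [List.length_cons]; ring
      rw [hn]
      exact hx

-- … while B's recursion always starts its first pair at the current offset
theorem pvSeg_head : ∀ (fuel : Nat) (lines : List String) (off : Int),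
    lines.length ≤ fuel →
    ∃ (x : Int) (rest : List (Int × Int)), pvSeg fuel lines off = (off, x) :: rest := by
  intro fuel lines off hf
  rw [pvSeg]
  cases h : lines.findIdx? pvIsBoundary with
  | none => exact ⟨off + (lines.length : Int), [], rfl⟩
  | some i =>
    have hi : i < lines.length := List.findIdx?_eq_some_iff_findIdx_eq.mp h |>.1
    cases fuel with
    | zero => omega
    | succ fuel' =>
      exact ⟨off + (i : Int), _, rfl⟩

-- ===== VERDICT (by name: the statement is the Claim_ definition above) =====
theorem identify_stacktrace_segments_py_spec : Claim_unchanged_identify_stacktrace_segments_py := by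
  intro xs _ hnd
  cases xs with
  | nil => rfl
  | cons h t =>
    have hb : pvIsBoundary h = false := by
      cases hP : pvIsBoundary h
      · rfl
      · exact absurd ⟨List.cons_ne_nil h t, hP⟩ hnd
    show identify_stacktrace_segments_py (h :: t) = identify_stacktrace_segments_py_alt (h :: t)
    have hB : identify_stacktrace_segments_py_alt (h :: t) = pvSeg (h :: t).length (h :: t) 0 := rfl
    rw [hB, pvSeg_eq_fold (h :: t).length (h :: t) 0 (le_refl _)]
    unfold identify_stacktrace_segments_py
    simp only [PySem.List.enumerate_cons, List.foldl_cons, List.filter_cons, hb,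
      Bool.false_eq_true, if_false]
    rw [pvStepA_neg (0, []) 0 h hb]
    have := pv_main t 1 0 [] (by omega) (by omega)
    norm_num at this
    have hn : ((h :: t).length : Int) = 1 + (t.length : Int) := by
      push_cast [List.length_cons]; ring
    simp only [hn, zero_add]
    exact this

theorem identify_stacktrace_segments_py_changed : Claim_changed_identify_stacktrace_segments_py := by
  unfold Claim_changed_identify_stacktrace_segments_py; decide

theorem identify_stacktrace_segments_py_tight : Claim_exact_identify_stacktrace_segments_py := by
  intro xs _ hd heq
  obtain ⟨hne, hsent⟩ := hd
  cases xs with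
  | nil => exact hne rfl
  | cons h t =>
    have hb : pvIsBoundary h = true := hsent
    have hA0 : pvStepA (0, ([] : List (Int × Int))) (0, h) = (0, [(0, 0)]) := by
      rw [pvStepA_pos (0, []) 0 h hb]
      rfl
    obtain ⟨x, rest, hxA⟩ := pv_A_zero t 1 [((0 : Int), (0 : Int))] (by omega)
    have hAform : identify_stacktrace_segments_py (h :: t)
        = ((0 : Int), (0 : Int)) :: ((0 : Int), x) :: rest := by
      unfold identify_stacktrace_segments_py
      simp only [PySem.List.enumerate_cons, List.foldl_cons]
      rw [hA0]
      simp only at hxA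
      have hn : ((h :: t).length : Int) = 1 + (t.length : Int) := by
        push_cast [List.length_cons]; ring
      simp only [hn]
      simpa using hxA
    have hBform : ∃ (y : Int) (restB : List (Int × Int)),
        identify_stacktrace_segments_py_alt (h :: t)
          = ((0 : Int), (0 : Int)) :: ((1 : Int), y) :: restB := by
      have hB : identify_stacktrace_segments_py_alt (h :: t)
          = pvSeg (h :: t).length (h :: t) 0 := rfl
      rw [hB, pvSeg]
      have hfind : (h :: t).findIdx? pvIsBoundary = some 0 := by
        rw [List.findIdx?_cons, hb]
        rfl
      rw [hfind]
      simp only [List.length_cons, Nat.cast_zero, add_zero, List.drop_succ_cons, List.drop_zero,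
        zero_add]
      obtain ⟨y, restB, hy⟩ := pvSeg_head t.length t 1 (le_refl _)
      exact ⟨y, restB, by rw [hy]⟩
    obtain ⟨y, restB, hyB⟩ := hBform
    rw [hAform, hyB] at heq
    simp at heq
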